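-- pv_equiv track=rewrite | github.com/hayrdenhald/public_notes | inline_code_to_html.py | convert_inline_code_to_html
-- ===== SOURCE A (Python) =====
-- from typing import List, Tuple
--
-- def encapsulate_text_in_code_tag(text: str) -> str:
--     return f'<code="inline-code">{text}</code>'
--
-- def is_inline_code_symbol(char: str) -> bool:
--     return char == '`'
--
-- def inline_code_indices(text: str) -> Tuple[bool, List[int]]:
--     result = []
--     gather = ()
--     inside_code_block = False
--     for idx, char in enumerate(text):
--         if is_inline_code_symbol(char):
--             if inside_code_block:
--                 inside_code_block = False
--                 gather = (gather[0], idx)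
--                 result.append(gather)
--                 gather = ()
--             else:
--                 gather = (idx, 0)
--                 inside_code_block = True
--     return result
--
-- def convert_inline_code_to_html(text: str) -> str:
--     indices = inline_code_indices(text)
--     assert len(indices) % 2 == 0
--
--     if indices:
--         prev = 0
--         result = []
--         for (start, stop) in indices:
--             result.append(text[prev:start])
--             result.append(encapsulate_text_in_code_tag(
--                 text[start + 1:stop])
--             )
--             prev = stop + 1
--         result.append(text[prev:])
--         return ''.join(result)
--     else:
--         return text
-- ===== SOURCE B (Python) =====
-- def convert_inline_code_to_html(text: str) -> str:
--     # Single left-to-right pass: find each backtick-delimited span with str.find and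
--     # emit the tagged content; no index-gathering pre-pass, no state machine.
--     out = []
--     i = 0
--     while True:
--         j = text.find('`', i)
--         if j == -1:
--             out.append(text[i:])
--             break
--         k = text.find('`', j + 1)
--         if k == -1:
--             out.append(text[i:])
--             break
--         out.append(text[i:j])
--         out.append(f'<code="inline-code">{text[j+1:k]}</code>')
--         i = k + 1
--     return ''.join(out)
-- ===== Notes on version B (the rewrite author's own statement) =====
-- stated objective: simpler
-- what changed: Replaced A's two-phase design (a state-machine pass collecting (start,stop) backtick index pairs, then a slice-and-join reassembly loop) with one direct left-to-right scan that uses str.find to locate each backtick-delimited span and emits output as it goes.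
import Mathlib
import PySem

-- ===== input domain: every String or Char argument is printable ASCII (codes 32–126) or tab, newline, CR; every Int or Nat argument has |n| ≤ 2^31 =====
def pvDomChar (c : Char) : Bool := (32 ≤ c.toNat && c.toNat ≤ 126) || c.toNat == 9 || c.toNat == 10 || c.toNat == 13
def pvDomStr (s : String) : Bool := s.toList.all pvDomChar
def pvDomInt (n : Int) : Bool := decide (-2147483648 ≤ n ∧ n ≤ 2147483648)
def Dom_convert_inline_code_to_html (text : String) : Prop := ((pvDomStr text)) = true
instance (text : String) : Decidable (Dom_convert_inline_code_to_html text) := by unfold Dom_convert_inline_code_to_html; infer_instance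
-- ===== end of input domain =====

-- B replaces A's two-phase index-collection + slice/join reassembly with one direct
-- left-to-right scan that finds each `...` span and emits output as it goes (simpler).


-- ===== PORT A =====
def encapsulate_text_in_code_tag (text : String) : String :=
  PySem.Str.join "" ["<code=\"inline-code\">", text, "</code>"]

def is_inline_code_symbol (char : Char) : Bool := char = '`'

-- Python's 'gather' tuple: () is modeled as none, (idx, 0) as some idx (the second
-- component 0 is never read); 'gather[0]' when inside is the 'some' payload.
def inline_code_indices (text : String) : List (Int × Int) :=
  let fin := (PySem.List.enumerate text.toList).foldl
    (fun (st : List (Int × Int) × Option Int × Bool) p =>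
      if is_inline_code_symbol p.2 then
        if st.2.2 then
          (st.1 ++ [(st.2.1.getD 0, p.1)], none, false)
        else
          (st.1, some p.1, true)
      else st)
    ([], none, false)
  fin.1

-- Python's 'assert len(indices) % 2 == 0' raises on odd pair counts: those inputs
-- are excluded by Pre_ below; the port returns the value A computes when it passes.
def convert_inline_code_to_html (text : String) : String :=
  let indices := inline_code_indices text
  if indices ≠ [] then
    let fin := indices.foldl
      (fun (st : Int × List String) p =>
        (p.2 + 1,
         st.2 ++ [PySem.Str.slice text (some st.1) (some p.1),
                  encapsulate_text_in_code_tag (PySem.Str.slice text (some (p.1 + 1)) (some p.2))]))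
      (0, [])
    PySem.Str.join "" (fin.2 ++ [PySem.Str.slice text (some fin.1) none])
  else text

-- ===== PORT B =====
def pvTagChars (s : List Char) : List Char :=
  "<code=\"inline-code\">".toList ++ s ++ "</code>".toList

-- hand port of text.find('`', i) (exact: none iff find returns -1; otherwise splits
-- the suffix at the first backtick into the part before it and the part after it)
def pvSplitTick : List Char → Option (List Char × List Char)
  | [] => none
  | c :: r => if c = '`' then some ([], r)
              else (pvSplitTick r).map (fun pr => (c :: pr.1, pr.2))

theorem pvSplitTick_some {l p r : List Char} (h : pvSplitTick l = some (p, r)) :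
    l = p ++ '`' :: r ∧ '`' ∉ p := by
  induction l generalizing p r with
  | nil => simp [pvSplitTick] at h
  | cons c t ih =>
    by_cases hc : c = '`'
    · subst hc
      simp [pvSplitTick] at h
      obtain ⟨h1, h2⟩ := h
      subst h1; subst h2
      simp
    · rw [pvSplitTick, if_neg hc] at h
      cases hsp : pvSplitTick t with
      | none => rw [hsp] at h; simp at h
      | some pr =>
        rw [hsp] at h
        simp at h
        obtain ⟨h1, h2⟩ := ih (p := pr.1) (r := pr.2) (by rw [hsp])
        constructor
        · rw [← h.1, ← h.2]; simp [h1]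
        · rw [← h.1]
          simp [h2]
          exact fun e => hc e.symm

-- one while-loop iteration of Source B = one recursive call; both 'break's = base cases
def pvAltLoop (l : List Char) : List Char :=
  match h : pvSplitTick l with
  | none => l
  | some (p, r) =>
    match h2 : pvSplitTick r with
    | none => l
    | some (q, r2) => p ++ pvTagChars q ++ pvAltLoop r2
termination_by l.length
decreasing_by
  have hl := (pvSplitTick_some h).1
  have hr := (pvSplitTick_some h2).1
  subst hl; rw [hr]
  simp
  omega

def convert_inline_code_to_html_alt (text : String) : String :=
  String.ofList (pvAltLoop text.toList)

-- ===== PRECONDITION & SPEC =====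
-- Pre_ excludes exactly the inputs where Python A raises AssertionError:
-- texts whose number of complete backtick pairs (backtick count floor-div 2) is odd.
def Pre_convert_inline_code_to_html (text : String) : Prop :=
  (text.toList.count '`') / 2 % 2 = 0
instance (text : String) : Decidable (Pre_convert_inline_code_to_html text) := by
  unfold Pre_convert_inline_code_to_html; infer_instance

def pvWitness_convert_inline_code_to_html : String := "`a` and `b`"

def Spec_convert_inline_code_to_html (text : String) (out : String) : Prop :=
  out = convert_inline_code_to_html_alt text
instance (text : String) (out : String) : Decidable (Spec_convert_inline_code_to_html text out) := by
  unfold Spec_convert_inline_code_to_html; infer_instance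

-- ===== CLAIM (what is proved, stated in full; the proofs are below) =====
def Claim_equal_convert_inline_code_to_html : Prop := ∀ (text : String), Dom_convert_inline_code_to_html text → Pre_convert_inline_code_to_html text → Spec_convert_inline_code_to_html text (convert_inline_code_to_html text)


-- ===== LEMMAS AND PROOFS =====

theorem pvSplitTick_none {l : List Char} : pvSplitTick l = none ↔ '`' ∉ l := by
  induction l with
  | nil => simp [pvSplitTick]
  | cons c t ih =>
    by_cases hc : c = '`'
    · subst hc; simp [pvSplitTick]
    · have hc' : ¬('`' = c) := fun e => hc e.symm
      simp [pvSplitTick, hc, hc', ih]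

theorem pvJoin_nil_flatten (ps : List (List Char)) : PySem.Chars.join [] ps = ps.flatten := by
  unfold PySem.Chars.join
  induction ps with
  | nil => rfl
  | cons a l ih =>
    cases l with
    | nil => simp [List.intercalate]
    | cons b m => simp_all [List.intercalate, List.intersperse]

theorem pvEncap_toList (t : String) :
    (encapsulate_text_in_code_tag t).toList = pvTagChars t.toList := by
  simp [encapsulate_text_in_code_tag, PySem.Str.toList_join, pvJoin_nil_flatten, pvTagChars]

-- recursive characterization of A's index-gathering fold
def pvIdx : Option Int → Int → List Char → List (Int × Int)
  | _, _, [] => []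
  | some g, n, c :: r => if c = '`' then (g, n) :: pvIdx none (n + 1) r else pvIdx (some g) (n + 1) r
  | none, n, c :: r => if c = '`' then pvIdx (some n) (n + 1) r else pvIdx none (n + 1) r

theorem pvIdx_loop (l : List Char) : ∀ (res : List (Int × Int)) (g : Option Int) (b : Bool) (n : Int),
    ((PySem.List.enumerate l n).foldl
      (fun (st : List (Int × Int) × Option Int × Bool) p =>
        if is_inline_code_symbol p.2 then
          if st.2.2 then (st.1 ++ [(st.2.1.getD 0, p.1)], none, false)
          else (st.1, some p.1, true)
        else st)
      (res, g, b)).1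
    = res ++ pvIdx (if b then some (g.getD 0) else none) n l := by
  induction l with
  | nil => intro res g b n; cases b <;> simp [PySem.List.enumerate_nil, pvIdx]
  | cons c t ih =>
    intro res g b n
    simp only [is_inline_code_symbol] at ih ⊢
    rw [PySem.List.enumerate_cons, List.foldl_cons]
    by_cases hc : c = '`'
    · cases b
      · simp only [hc, decide_true, if_true, Bool.false_eq_true, if_false]
        rw [ih]
        simp [pvIdx]
      · simp only [hc, decide_true, if_true]
        rw [ih]
        simp [pvIdx]
    · simp only [hc, decide_false, Bool.false_eq_true, if_false]
      rw [ih]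
      cases b <;> simp [pvIdx, hc]

theorem pvInline_code_indices_eq (text : String) :
    inline_code_indices text = pvIdx none 0 text.toList := by
  unfold inline_code_indices
  rw [pvIdx_loop]
  simp

theorem pvIdx_no_tick {l : List Char} (h : '`' ∉ l) : ∀ (g : Option Int) (n : Int),
    pvIdx g n l = [] := by
  induction l with
  | nil => intro g n; cases g <;> rfl
  | cons c t ih =>
    intro g n
    simp only [List.mem_cons, not_or] at h
    have hc : ¬(c = '`') := fun e => h.1 e.symm
    cases g <;> simp [pvIdx, hc, ih h.2]

theorem pvIdx_open {p : List Char} (hp : '`' ∉ p) (r : List Char) (n : Int) :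
    pvIdx none n (p ++ '`' :: r) = pvIdx (some (n + p.length)) (n + p.length + 1) r := by
  induction p generalizing n with
  | nil => simp [pvIdx]
  | cons c t ih =>
    simp only [List.mem_cons, not_or] at hp
    have hc : ¬(c = '`') := fun e => hp.1 e.symm
    simp only [List.cons_append, pvIdx, if_neg hc]
    rw [ih hp.2]
    have e1 : n + 1 + (t.length : Int) = n + ((c :: t).length : Int) := by simp; ring
    rw [e1]

theorem pvIdx_close {q : List Char} (hq : '`' ∉ q) (r : List Char) (g n : Int) :
    pvIdx (some g) n (q ++ '`' :: r) = (g, n + q.length) :: pvIdx none (n + q.length + 1) r := by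
  induction q generalizing n with
  | nil => simp [pvIdx]
  | cons c t ih =>
    simp only [List.mem_cons, not_or] at hq
    have hc : ¬(c = '`') := fun e => hq.1 e.symm
    simp only [List.cons_append, pvIdx, if_neg hc]
    rw [ih hq.2]
    have e1 : n + 1 + (t.length : Int) = n + ((c :: t).length : Int) := by simp; ring
    rw [e1]

theorem pvIdx_nonneg {l : List Char} : ∀ (g : Option Int) (n : Int), 0 ≤ n →
    (∀ g0, g = some g0 → 0 ≤ g0) →
    ∀ pr ∈ pvIdx g n l, 0 ≤ pr.1 ∧ 0 ≤ pr.2 := by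
  induction l with
  | nil => intro g n _ _ pr hpr; cases g <;> simp [pvIdx] at hpr
  | cons c t ih =>
    intro g n hn hg pr hpr
    cases g with
    | none =>
      by_cases hc : c = '`'
      · rw [pvIdx, if_pos hc] at hpr
        exact ih (some n) (n + 1) (by omega) (by intro g0 e; cases e; omega) pr hpr
      · rw [pvIdx, if_neg hc] at hpr
        exact ih none (n + 1) (by omega) (by simp) pr hpr
    | some g0 =>
      have hg0 : 0 ≤ g0 := hg g0 rfl
      by_cases hc : c = '`'
      · rw [pvIdx, if_pos hc] at hpr
        rcases List.mem_cons.1 hpr with h | h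
        · subst h; constructor <;> simp <;> omega
        · exact ih none (n + 1) (by omega) (by simp) pr h
      · rw [pvIdx, if_neg hc] at hpr
        exact ih (some g0) (n + 1) (by omega) (by intro g1 e; cases e; omega) pr hpr

theorem pvIdx_shift (l : List Char) : ∀ (g : Option Int) (n k : Int),
    pvIdx (g.map (· + k)) (n + k) l = (pvIdx g n l).map (fun pr => (pr.1 + k, pr.2 + k)) := by
  induction l with
  | nil => intro g n k; cases g <;> rfl
  | cons c t ih =>
    intro g n k
    cases g with
    | none =>
      by_cases hc : c = '`'
      · simp only [Option.map_none, pvIdx, if_pos hc]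
        have := ih (some n) (n + 1) k
        simp only [Option.map_some] at this
        rw [show n + k + 1 = n + 1 + k by ring, this]
      · simp only [Option.map_none, pvIdx, if_neg hc]
        have := ih none (n + 1) k
        simp only [Option.map_none] at this
        rw [show n + k + 1 = n + 1 + k by ring, this]
    | some g0 =>
      by_cases hc : c = '`'
      · simp only [Option.map_some, pvIdx, if_pos hc]
        have := ih none (n + 1) k
        simp only [Option.map_none] at this
        rw [show n + k + 1 = n + 1 + k by ring, this]
        simp
      · simp only [Option.map_some, pvIdx, if_neg hc]
        have := ih (some g0) (n + 1) k
        simp only [Option.map_some] at this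
        rw [show n + k + 1 = n + 1 + k by ring, this]

-- A's reassembly loop, recursively
def pvAsm (l : List Char) : List (Int × Int) → Int → List Char
  | [], prev => PySem.List.slice l (some prev) none
  | (s, e) :: rest, prev =>
    PySem.List.slice l (some prev) (some s) ++ pvTagChars (PySem.List.slice l (some (s + 1)) (some e))
      ++ pvAsm l rest (e + 1)

theorem pvAsm_fold (text : String) (idx : List (Int × Int)) : ∀ (prev : Int) (parts : List String),
    (PySem.Str.join "" ((idx.foldl
        (fun (st : Int × List String) p =>
          (p.2 + 1,
           st.2 ++ [PySem.Str.slice text (some st.1) (some p.1),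
                    encapsulate_text_in_code_tag (PySem.Str.slice text (some (p.1 + 1)) (some p.2))]))
        (prev, parts)).2
      ++ [PySem.Str.slice text (some ((idx.foldl
        (fun (st : Int × List String) p =>
          (p.2 + 1,
           st.2 ++ [PySem.Str.slice text (some st.1) (some p.1),
                    encapsulate_text_in_code_tag (PySem.Str.slice text (some (p.1 + 1)) (some p.2))]))
        (prev, parts)).1)) none])).toList
    = (parts.map String.toList).flatten ++ pvAsm text.toList idx prev := by
  induction idx with
  | nil =>
    intro prev parts
    simp [PySem.Str.toList_join, pvJoin_nil_flatten, pvAsm, PySem.Str.toList_slice]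
  | cons se rest ih =>
    intro prev parts
    obtain ⟨s, e⟩ := se
    simp only [List.foldl_cons]
    rw [ih]
    simp [pvAsm, PySem.Str.toList_slice, pvEncap_toList]

theorem pvA_eq_asm (text : String) :
    (convert_inline_code_to_html text).toList
      = pvAsm text.toList (pvIdx none 0 text.toList) 0 := by
  unfold convert_inline_code_to_html
  rw [pvInline_code_indices_eq]
  by_cases h : pvIdx none 0 text.toList = []
  · simp [h, pvAsm, PySem.List.slice_zero_start, PySem.List.slice_none_none]
  · simp only [h, ne_eq, not_false_eq_true, if_true]
    rw [pvAsm_fold]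
    simp

theorem pvSlice_shift (P m : List Char) (a b : Int) (ha : 0 ≤ a) (hb : 0 ≤ b) :
    PySem.List.slice (P ++ m) (some (a + P.length)) (some (b + P.length))
      = PySem.List.slice m (some a) (some b) := by
  rw [show a + (P.length : Int) = ((a.toNat + P.length : Nat) : Int) by push_cast; omega]
  rw [show b + (P.length : Int) = ((b.toNat + P.length : Nat) : Int) by push_cast; omega]
  rw [show a = ((a.toNat : Nat) : Int) by omega, show b = ((b.toNat : Nat) : Int) by omega]
  rw [PySem.List.slice_natCast, PySem.List.slice_natCast]
  simp only [Int.toNat_natCast]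
  rw [show a.toNat + P.length = P.length + a.toNat by ring, ← List.drop_drop, List.drop_left]
  congr 1
  omega

theorem pvSliceFrom_shift (P m : List Char) (a : Int) (ha : 0 ≤ a) :
    PySem.List.slice (P ++ m) (some (a + P.length)) none = PySem.List.slice m (some a) none := by
  rw [show a + (P.length : Int) = ((a.toNat + P.length : Nat) : Int) by push_cast; omega]
  rw [show a = ((a.toNat : Nat) : Int) by omega]
  rw [PySem.List.slice_from_natCast, PySem.List.slice_from_natCast]
  simp only [Int.toNat_natCast]
  rw [show a.toNat + P.length = P.length + a.toNat by ring, ← List.drop_drop, List.drop_left]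

theorem pvAsm_shift (P m : List Char) (idx : List (Int × Int)) : ∀ (prev : Int), 0 ≤ prev →
    (∀ pr ∈ idx, 0 ≤ pr.1 ∧ 0 ≤ pr.2) →
    pvAsm (P ++ m) (idx.map (fun pr => (pr.1 + P.length, pr.2 + P.length))) (prev + P.length)
      = pvAsm m idx prev := by
  induction idx with
  | nil =>
    intro prev hp _
    simp only [List.map_nil, pvAsm]
    exact pvSliceFrom_shift P m prev hp
  | cons se rest ih =>
    intro prev hp hnn
    obtain ⟨s, e⟩ := se
    have hs := (hnn (s, e) (by simp)).1
    have he := (hnn (s, e) (by simp)).2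
    simp only [List.map_cons, pvAsm]
    rw [pvSlice_shift P m prev s hp hs]
    rw [show s + (P.length : Int) + 1 = (s + 1) + (P.length : Int) by ring]
    rw [pvSlice_shift P m (s + 1) e (by omega) he]
    rw [show e + (P.length : Int) + 1 = (e + 1) + (P.length : Int) by ring]
    rw [ih (e + 1) (by omega) (fun pr hpr => hnn pr (by simp [hpr]))]

theorem pvMain : ∀ (N : Nat) (l : List Char), l.length ≤ N →
    pvAsm l (pvIdx none 0 l) 0 = pvAltLoop l := by
  intro N
  induction N with
  | zero =>
    intro l hl
    have : l = [] := List.eq_nil_of_length_eq_zero (by omega)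
    subst this
    simp [pvIdx, pvAsm, pvAltLoop, pvSplitTick]
  | succ N ih =>
    intro l hl
    cases hsp : pvSplitTick l with
    | none =>
      have hnt : '`' ∉ l := pvSplitTick_none.mp hsp
      rw [pvIdx_no_tick hnt]
      rw [pvAltLoop, hsp]
      simp [pvAsm]
    | some pr =>
      obtain ⟨p, r⟩ := pr
      obtain ⟨hl1, hp⟩ := pvSplitTick_some hsp
      cases hsp2 : pvSplitTick r with
      | none =>
        have hnt : '`' ∉ r := pvSplitTick_none.mp hsp2
        rw [pvAltLoop, hsp]
        dsimp only
        rw [hsp2]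
        dsimp only
        rw [hl1, pvIdx_open hp, pvIdx_no_tick hnt]
        rw [← hl1]
        simp [pvAsm]
      | some pr2 =>
        obtain ⟨q, r2⟩ := pr2
        obtain ⟨hr1, hq⟩ := pvSplitTick_some hsp2
        rw [pvAltLoop, hsp]
        dsimp only
        rw [hsp2]
        dsimp only
        subst hr1; subst hl1
        rw [pvIdx_open hp, pvIdx_close hq]
        simp only [zero_add]
        simp only [pvAsm]
        have hlen : r2.length ≤ N := by simp at hl; omega
        -- piece 1 : text[0:start] is p
        have hA1 : PySem.List.slice (p ++ '`' :: (q ++ '`' :: r2)) (some 0) (some (p.length : Int)) = p := by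
          simp [PySem.List.slice_to_natCast]
        -- piece 2 : text[start+1:stop] is q
        have hA2 : PySem.List.slice (p ++ '`' :: (q ++ '`' :: r2))
            (some ((p.length : Int) + 1)) (some ((p.length : Int) + 1 + q.length)) = q := by
          have hP : p ++ '`' :: (q ++ '`' :: r2) = (p ++ ['`']) ++ (q ++ '`' :: r2) := by simp
          have := pvSlice_shift (p ++ ['`']) (q ++ '`' :: r2) 0 (q.length : Int) le_rfl (by positivity)
          rw [hP]
          rw [show (p.length : Int) + 1 = 0 + ((p ++ ['`']).length : Int) by simp]
          rw [show 0 + ((p ++ ['`']).length : Int) + (q.length : Int)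
              = (q.length : Int) + ((p ++ ['`']).length : Int) by ring] at *
          rw [this]
          simp [PySem.List.slice_to_natCast]
        -- piece 3 : the recursive tail
        have hA3 : pvAsm (p ++ '`' :: (q ++ '`' :: r2))
            (pvIdx none ((p.length : Int) + 1 + q.length + 1) r2) ((p.length : Int) + 1 + q.length + 1)
            = pvAsm r2 (pvIdx none 0 r2) 0 := by
          have hK : p ++ '`' :: (q ++ '`' :: r2) = (p ++ '`' :: q ++ ['`']) ++ r2 := by simp
          have hk : (p.length : Int) + 1 + q.length + 1 = 0 + ((p ++ '`' :: q ++ ['`']).length : Int) := by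
            simp; ring
          have hshift := pvIdx_shift r2 none 0 ((p ++ '`' :: q ++ ['`']).length : Int)
          simp only [Option.map_none] at hshift
          rw [hk, hK, hshift]
          exact pvAsm_shift (p ++ '`' :: q ++ ['`']) r2 (pvIdx none 0 r2) 0 le_rfl
            (pvIdx_nonneg none 0 le_rfl (by simp))
        rw [hA1, hA2, hA3, ih r2 hlen]

-- ===== VERDICT (by name: the statement is the Claim_ definition above) =====
theorem convert_inline_code_to_html_spec : Claim_equal_convert_inline_code_to_html := by
  intro text _ _
  unfold Spec_convert_inline_code_to_html convert_inline_code_to_html_alt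
  apply String.toList_inj.mp
  rw [String.toList_ofList, pvA_eq_asm]
  exact pvMain text.toList.length text.toList le_rfl
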